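-- pv_equiv track=rewrite | github.com/jonathantsang/CompetitiveProgramming | codeforces/global_round_8/b/b.py | solve
-- ===== SOURCE A (Python) =====
-- def calc(ans):
-- 	amt = 0
-- 	prev = 1
-- 	for i in range(len(ans)-1, -1, -1):
-- 		prev *= ans[i]
-- 	return prev
--
-- def solve(k):
-- 	amt = 1
-- 	chars = list("codeforces")
-- 	ans = [1 for _ in range(len(chars))] # number of chars at each position in chars
-- 	idx = len(chars)-1
-- 	while calc(ans) < k:
-- 		ans[idx] += 1
-- 		if idx == -1:
-- 			idx=len(chars)-1
-- 		idx-=1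
--
-- 	ret = []
-- 	for i,n in enumerate(ans):
-- 		ret.append(chars[i]*n)
-- 	return "".join(ret)
-- ===== SOURCE B (Python) =====
-- def solve(k):
--     # Instead of simulating A's one-increment-at-a-time walk, compute the answer
--     # shape directly: the final counts are q+1 for the first 10-r letters and
--     # q+2 for the last r.  Find q = least base with (q+2)**10 >= k, then
--     # r = least number of promoted letters with (q+1)**(10-r) * (q+2)**r >= k,
--     # and build the string from the two slices.
--     q = 0
--     while (q + 2) ** 10 < k:
--         q += 1
--     r = 0
--     while (q + 1) ** (10 - r) * (q + 2) ** r < k: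
--         r += 1
--     s = "codeforces"
--     return "".join(ch * (q + 1) for ch in s[:10 - r]) + \
--            "".join(ch * (q + 2) for ch in s[10 - r:])
-- ===== Notes on version B (the rewrite author's own statement) =====
-- stated objective: alternative
-- what changed: B does not simulate A's increment walk at all: it computes the final shape directly by two staged minimal searches (least base q with (q+2)**10 >= k, then least promotion count r with (q+1)**(10-r)*(q+2)**r >= k) and builds the string from two slices, with no counts array and no per-step product rescan.
import Mathlib
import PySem

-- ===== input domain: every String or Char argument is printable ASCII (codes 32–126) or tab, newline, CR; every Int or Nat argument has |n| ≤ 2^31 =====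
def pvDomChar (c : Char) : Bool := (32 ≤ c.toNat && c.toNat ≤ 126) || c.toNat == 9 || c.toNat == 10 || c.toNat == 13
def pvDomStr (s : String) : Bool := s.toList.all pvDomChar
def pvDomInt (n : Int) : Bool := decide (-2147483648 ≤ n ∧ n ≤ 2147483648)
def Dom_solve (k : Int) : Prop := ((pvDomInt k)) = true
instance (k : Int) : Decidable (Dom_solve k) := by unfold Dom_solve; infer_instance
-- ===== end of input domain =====

-- B replaces A's one-increment-at-a-time simulation by two staged minimal searches
-- (least base q, then least promotion count r) and builds the string from two slices;
-- objective: alternative (no counts array, no per-step product rescan).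

-- ===== PORT A =====
-- Python string repetition s * n (empty for n ≤ 0); exact via PySem.List.pyRepeat.
def strMul (s : String) (n : Int) : String := String.ofList (PySem.List.pyRepeat s.toList n)

def calcA (ans : List Int) : Int :=
  (PySem.List.pyRange ((ans.length : Int) - 1) (-1) (-1)).foldl
    (fun prev i => prev * PySem.List.pyGetD ans i 0) 1

def charsA : List String := ["c","o","d","e","f","o","r","c","e","s"]

-- 'while calc(ans) < k' as fuel recursion; fuel k.toNat suffices (the product grows by ≥ 1 per increment).
def loopA (k : Int) : Nat → List Int → Int → List Int
  | 0, ans, _ => ans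
  | fuel+1, ans, idx =>
    if calcA ans < k then
      let ans' := PySem.List.pySetD ans idx (PySem.List.pyGetD ans idx 0 + 1)
      let idx' := if idx = -1 then (charsA.length : Int) - 1 else idx
      loopA k fuel ans' (idx' - 1)
    else ans

def solve (k : Int) : String :=
  let chars := charsA
  let ans0 : List Int := (List.range chars.length).map (fun _ => 1)
  let ans := loopA k k.toNat ans0 ((chars.length : Int) - 1)
  let ret := (PySem.List.enumerate ans 0).map (fun p => strMul (PySem.List.pyGetD chars p.1 "") p.2)
  PySem.Str.join "" ret

-- ===== PORT B =====
-- 'while (q+2)**10 < k: q += 1'; fuel k.toNat suffices (for k > 1024 at most 7 steps are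
-- taken since 9^10 > 2^31, and for k ≤ 1024 the loop body never runs).
def qloopB (k : Int) : Nat → Int → Int
  | 0, q => q
  | fuel+1, q => if (q + 2) ^ 10 < k then qloopB k fuel (q + 1) else q

-- 'while (q+1)**(10-r) * (q+2)**r < k: r += 1'; fuel 11 suffices: the condition fails at
-- r = 10 because (q+2)**10 ≥ k by the choice of q. Exponents are ≥ 0 throughout (r ≤ 10),
-- so Python ** is exactly ^ on .toNat.
def rloopB (k q : Int) : Nat → Int → Int
  | 0, r => r
  | fuel+1, r =>
    if (q + 1) ^ ((10 - r).toNat) * (q + 2) ^ (r.toNat) < k then rloopB k q fuel (r + 1) else r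

def solve_alt (k : Int) : String :=
  let q := qloopB k k.toNat 0
  let r := rloopB k q 11 0
  let s := "codeforces".toList
  -- 'ch * n' ported as replicate (n ≥ 0 here as in Python); '+' of the two joins as list append.
  String.ofList
    ((PySem.Str.join "" ((PySem.List.slice s none (some (10 - r))).map
        (fun ch => String.ofList (List.replicate (q + 1).toNat ch)))).toList ++
     (PySem.Str.join "" ((PySem.List.slice s (some (10 - r)) none).map
        (fun ch => String.ofList (List.replicate (q + 2).toNat ch)))).toList)

-- ===== PRECONDITION & SPEC =====
def Spec_solve (k : Int) (out : String) : Prop := out = solve_alt k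
instance (k : Int) (out : String) : Decidable (Spec_solve k out) := by unfold Spec_solve; infer_instance

-- ===== CLAIM (what is proved, stated in full; the proofs are below) =====
def Claim_equal_solve : Prop := ∀ (k : Int), Dom_solve k → Spec_solve k (solve k)

-- ===== LEMMAS AND PROOFS =====

-- the counts list A's ans holds after q full passes plus r extra increments of the cycle 9,8,…,0
def cnts (q r : Int) : List Int := (List.range 10).map (fun i => if 10 - r ≤ (i : Int) then q + 2 else q + 1)

-- A's walk through the states (q full passes, r extra increments), one increment per step
def walk (k : Int) : Nat → Int → Int → Int × Int
  | 0, q, r => (q, r)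
  | fuel+1, q, r =>
    if (q + 2) ^ r.toNat * (q + 1) ^ ((10 - r).toNat) < k then
      if r + 1 = 10 then walk k fuel (q + 1) 0 else walk k fuel q (r + 1)
    else (q, r)

theorem calc_cnts (q r : Int) (hr : 0 ≤ r) (hr10 : r < 10) :
    calcA (cnts q r) = (q + 2) ^ r.toNat * (q + 1) ^ ((10 - r).toNat) := by
  interval_cases r <;>
    simp [cnts, calcA, List.range_succ, PySem.List.pyRange_neg_one,
      PySem.List.pyGetD, PySem.List.pyGet?, PySem.List.pyIdx?] <;> (first | (left; ring) | ring)

theorem set_cnts (q r : Int) (hr : 0 ≤ r) (hr10 : r < 10) :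
    PySem.List.pySetD (cnts q r) (9 - r) (PySem.List.pyGetD (cnts q r) (9 - r) 0 + 1)
      = if r = 9 then cnts (q + 1) 0 else cnts q (r + 1) := by
  interval_cases r <;>
    simp [cnts, List.range_succ, PySem.List.pySetD, PySem.List.pySet?,
      PySem.List.pyGetD, PySem.List.pyGet?, PySem.List.pyIdx?, List.set] <;> ring_nf

theorem set_cnts_neg (q : Int) :
    PySem.List.pySetD (cnts q 0) (-1) (PySem.List.pyGetD (cnts q 0) (-1) 0 + 1) = cnts q 1 := by
  simp [cnts, List.range_succ, PySem.List.pySetD, PySem.List.pySet?,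
    PySem.List.pyGetD, PySem.List.pyGet?, PySem.List.pyIdx?, List.set]
  ring

theorem loop_eq (k : Int) : ∀ (fuel : Nat) (q r idx : Int), 0 ≤ r → r < 10 →
    (idx = 9 - r ∨ (r = 0 ∧ idx = -1)) →
    loopA k fuel (cnts q r) idx = cnts (walk k fuel q r).1 (walk k fuel q r).2 := by
  intro fuel
  induction fuel with
  | zero => intro q r idx _ _ _; simp [loopA, walk]
  | succ n ih =>
    intro q r idx hr hr10 hidx
    simp only [loopA, walk, calc_cnts q r hr hr10]
    split
    · rcases hidx with hidx | ⟨hr0, hidx⟩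
      · subst hidx
        rw [set_cnts q r hr hr10]
        by_cases h9 : r = 9
        · subst h9
          norm_num
          exact ih (q + 1) 0 (-1) (by omega) (by omega) (Or.inr ⟨rfl, rfl⟩)
        · have hne : ¬ (9 - r = -1) := by omega
          have hne10 : ¬ (r + 1 = 10) := by omega
          simp only [if_neg h9, if_neg hne, if_neg hne10]
          exact ih q (r + 1) (9 - r - 1) (by omega) (by omega) (Or.inl (by omega))
      · subst hr0; subst hidx
        rw [set_cnts_neg q]
        norm_num [charsA]
        exact ih q 1 8 (by omega) (by omega) (Or.inl (by omega))
    · rfl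

-- states strictly before the (q, r)-full-product state are strictly below (q+2)^10
theorem prod_lt_full (q r : Int) (hq : 0 ≤ q) (hr : 0 ≤ r) (hr9 : r ≤ 9) :
    (q + 2) ^ r.toNat * (q + 1) ^ ((10 - r).toNat) < (q + 2) ^ 10 := by
  have hn : r.toNat + (10 - r).toNat = 10 := by omega
  have h1 : (q + 1) ^ ((10 - r).toNat) < (q + 2) ^ ((10 - r).toNat) := by
    have hne : (10 - r).toNat ≠ 0 := by omega
    exact pow_lt_pow_left₀ (by omega) (by omega) hne
  have h2 : (0:Int) < (q + 2) ^ r.toNat := pow_pos (by omega) _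
  calc (q + 2) ^ r.toNat * (q + 1) ^ ((10 - r).toNat)
      < (q + 2) ^ r.toNat * (q + 2) ^ ((10 - r).toNat) := by
        exact mul_lt_mul_of_pos_left h1 h2
    _ = (q + 2) ^ 10 := by rw [← pow_add, hn]

-- the walk stops at the first state (in walk order) whose product reaches k
theorem walk_first (k : Int) : ∀ (fuel : Nat) (q r tq tr : Int),
    0 ≤ r → r < 10 → 0 ≤ tr → tr < 10 →
    (q < tq ∨ (q = tq ∧ r ≤ tr)) →
    ((tq - q) * 10 + (tr - r)).toNat ≤ fuel →
    k ≤ (tq + 2) ^ tr.toNat * (tq + 1) ^ ((10 - tr).toNat) →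
    (∀ q' r', 0 ≤ r' → r' < 10 → q ≤ q' → (q' < tq ∨ (q' = tq ∧ r' < tr)) →
      (q' + 2) ^ r'.toNat * (q' + 1) ^ ((10 - r').toNat) < k) →
    walk k fuel q r = (tq, tr) := by
  intro fuel
  induction fuel with
  | zero =>
    intro q r tq tr hr hr10 htr htr10 hlex hfuel hge hlt
    have : q = tq ∧ r = tr := by omega
    simp [walk, this.1, this.2]
  | succ n ih =>
    intro q r tq tr hr hr10 htr htr10 hlex hfuel hge hlt
    by_cases hcur : q = tq ∧ r = tr
    · rw [hcur.1, hcur.2]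
      simp only [walk]
      rw [if_neg (by omega)]
    · have hstep : (q + 2) ^ r.toNat * (q + 1) ^ ((10 - r).toNat) < k :=
        hlt q r hr hr10 le_rfl (by omega)
      simp only [walk, if_pos hstep]
      by_cases h9 : r + 1 = 10
      · rw [if_pos h9]
        exact ih (q + 1) 0 tq tr (le_refl 0) (by omega) htr htr10 (by omega) (by omega) hge
          (fun q' r' h1 h2 h3 h4 => hlt q' r' h1 h2 (by omega) h4)
      · rw [if_neg h9]
        exact ih q (r + 1) tq tr (by omega) (by omega) htr htr10 (by omega) (by omega) hge hlt

-- qloopB never skips a base that already reaches k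
theorem qloop_skipped (k : Int) : ∀ (fuel : Nat) (q : Int),
    q ≤ qloopB k fuel q ∧ (∀ j, q ≤ j → j < qloopB k fuel q → (j + 2) ^ 10 < k) := by
  intro fuel
  induction fuel with
  | zero => intro q; exact ⟨le_refl q, fun j h1 h2 => absurd (lt_of_le_of_lt h1 h2) (by simp [qloopB])⟩
  | succ n ih =>
    intro q
    simp only [qloopB]
    split
    · rename_i hcond
      refine ⟨le_trans (by omega) (ih (q + 1)).1, fun j h1 h2 => ?_⟩
      rcases eq_or_lt_of_le h1 with h | h
      · exact h ▸ hcond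
      · exact (ih (q + 1)).2 j (by omega) h2
    · exact ⟨le_refl q, fun j h1 h2 => by omega⟩

-- with enough fuel qloopB stops at a base reaching k, and stays ≤ 7 when k ≤ 9^10
theorem qloop_hits (k : Int) (hk : k ≤ 3486784401) : ∀ (fuel : Nat) (q : Int),
    0 ≤ q → q ≤ 7 → (7 - q).toNat ≤ fuel →
    qloopB k fuel q ≤ 7 ∧ k ≤ (qloopB k fuel q + 2) ^ 10 := by
  intro fuel
  induction fuel with
  | zero =>
    intro q hq hq7 hfuel
    have : q = 7 := by omega
    subst this
    constructor
    · simp [qloopB]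
    · simpa [qloopB] using hk.trans_eq (by norm_num)
  | succ n ih =>
    intro q hq hq7 hfuel
    simp only [qloopB]
    split
    · rename_i hcond
      have : q ≠ 7 := by rintro rfl; norm_num at hcond; omega
      exact ih (q + 1) (by omega) (by omega) (by omega)
    · rename_i hcond
      exact ⟨hq7, by omega⟩

-- for k ≤ 1024 the body of qloopB never runs
theorem qloop_small (k : Int) (hk : k ≤ 1024) (fuel : Nat) : qloopB k fuel 0 = 0 := by
  cases fuel with
  | zero => rfl
  | succ n => simp only [qloopB]; rw [if_neg (by norm_num; omega)]

-- rloopB never skips a promotion count that already reaches k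
theorem rloop_skipped (k q : Int) : ∀ (fuel : Nat) (r : Int),
    r ≤ rloopB k q fuel r ∧
    (∀ j, r ≤ j → j < rloopB k q fuel r → (q + 1) ^ ((10 - j).toNat) * (q + 2) ^ (j.toNat) < k) := by
  intro fuel
  induction fuel with
  | zero => intro r; exact ⟨le_refl r, fun j h1 h2 => absurd (lt_of_le_of_lt h1 h2) (by simp [rloopB])⟩
  | succ n ih =>
    intro r
    simp only [rloopB]
    split
    · rename_i hcond
      refine ⟨le_trans (by omega) (ih (r + 1)).1, fun j h1 h2 => ?_⟩
      rcases eq_or_lt_of_le h1 with h | h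
      · exact h ▸ hcond
      · exact (ih (r + 1)).2 j (by omega) h2
    · exact ⟨le_refl r, fun j h1 h2 => by omega⟩

-- with fuel covering the remaining range rloopB stops at a count reaching k, and stays ≤ 10
theorem rloop_hits (k q : Int) (hQ : k ≤ (q + 2) ^ 10) : ∀ (fuel : Nat) (r : Int),
    0 ≤ r → r ≤ 10 → (10 - r).toNat ≤ fuel →
    rloopB k q fuel r ≤ 10 ∧
      k ≤ (q + 1) ^ ((10 - rloopB k q fuel r).toNat) * (q + 2) ^ ((rloopB k q fuel r).toNat) := by
  intro fuel
  induction fuel with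
  | zero =>
    intro r hr hr10 hfuel
    have : r = 10 := by omega
    subst this
    refine ⟨by simp [rloopB], ?_⟩
    simp only [rloopB, show ((10:Int) - 10).toNat = 0 from rfl, pow_zero, one_mul,
      show ((10:Int)).toNat = 10 from rfl]
    exact hQ
  | succ n ih =>
    intro r hr hr10 hfuel
    simp only [rloopB]
    split
    · rename_i hcond
      have : r ≠ 10 := by
        rintro rfl
        simp only [show ((10:Int) - 10).toNat = 0 from rfl, pow_zero, one_mul,
          show ((10:Int)).toNat = 10 from rfl] at hcond
        omega
      exact ih (r + 1) (by omega) (by omega) (by omega)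
    · rename_i hcond
      exact ⟨hr10, by omega⟩

-- the final string: A's rendering of cnts tq tr equals B's two-slice rendering at (q, r)
theorem stringify_eq (q r : Int) (hr : 0 ≤ r) (hr10 : r ≤ 10) :
    PySem.Str.join "" ((PySem.List.enumerate
        (cnts (if r = 10 then q + 1 else q) (if r = 10 then 0 else r)) 0).map
        (fun p => strMul (PySem.List.pyGetD charsA p.1 "") p.2))
      = String.ofList
        ((PySem.Str.join "" ((PySem.List.slice "codeforces".toList none (some (10 - r))).map
            (fun ch => String.ofList (List.replicate (q + 1).toNat ch)))).toList ++
         (PySem.Str.join "" ((PySem.List.slice "codeforces".toList (some (10 - r)) none).map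
            (fun ch => String.ofList (List.replicate (q + 2).toNat ch)))).toList) := by
  interval_cases r <;>
    (apply String.ext;
     simp [cnts, List.range_succ, charsA, strMul, PySem.List.enumerate,
       PySem.List.pyGetD, PySem.List.pyGet?, PySem.List.pyIdx?, PySem.List.pyRepeat_singleton,
       PySem.List.slice, PySem.List.clampIdx, PySem.Str.join, PySem.Chars.join,
       List.intercalate, List.append_assoc, show q + 1 + 1 = q + 2 by ring])

-- ===== VERDICT (by name: the statement is the Claim_ definition above) =====
theorem solve_spec : Claim_equal_solve := by
  intro k hdom
  unfold Spec_solve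
  show solve k = solve_alt k
  have hk31 : k ≤ 2147483648 := by
    simp only [Dom_solve, pvDomInt, decide_eq_true_eq] at hdom; exact hdom.2
  -- B's two staged searches
  obtain ⟨q, hq_def⟩ : ∃ q', qloopB k k.toNat 0 = q' := ⟨_, rfl⟩
  have hq0 : 0 ≤ q := hq_def ▸ (qloop_skipped k k.toNat 0).1
  have hqmin : ∀ j, 0 ≤ j → j < q → (j + 2) ^ 10 < k := fun j h1 h2 =>
    (qloop_skipped k k.toNat 0).2 j h1 (hq_def ▸ h2)
  have hqk : q ≤ 7 ∧ k ≤ (q + 2) ^ 10 := by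
    by_cases hsmall : k ≤ 1024
    · have hq0' : q = 0 := by rw [← hq_def]; exact qloop_small k hsmall k.toNat
      rw [hq0']; norm_num; omega
    · exact hq_def ▸ qloop_hits k (by omega) k.toNat 0 le_rfl (by omega) (by omega)
  obtain ⟨r, hr_def⟩ : ∃ r', rloopB k q 11 0 = r' := ⟨_, rfl⟩
  have hr0 : 0 ≤ r := hr_def ▸ (rloop_skipped k q 11 0).1
  have hrmin : ∀ j, 0 ≤ j → j < r →
      (q + 1) ^ ((10 - j).toNat) * (q + 2) ^ (j.toNat) < k := fun j h1 h2 =>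
    (rloop_skipped k q 11 0).2 j h1 (hr_def ▸ h2)
  have hrk : r ≤ 10 ∧ k ≤ (q + 1) ^ ((10 - r).toNat) * (q + 2) ^ (r.toNat) :=
    hr_def ▸ rloop_hits k q hqk.2 11 0 le_rfl (by norm_num) (by norm_num)
  -- the target state of A's walk
  obtain ⟨tq, htq_def⟩ : ∃ t, t = (if r = 10 then q + 1 else q) := ⟨_, rfl⟩
  obtain ⟨tr, htr_def⟩ : ∃ t, t = (if r = 10 then (0:Int) else r) := ⟨_, rfl⟩
  have htr0 : 0 ≤ tr := by rw [htr_def]; split <;> omega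
  have htr10 : tr < 10 := by rw [htr_def]; split <;> omega
  have hge : k ≤ (tq + 2) ^ tr.toNat * (tq + 1) ^ ((10 - tr).toNat) := by
    rw [htq_def, htr_def]
    by_cases h10 : r = 10
    · simp only [if_pos h10, show ((0:Int)).toNat = 0 from rfl, pow_zero, one_mul,
        show ((10:Int) - 0).toNat = 10 from rfl, show q + 1 + 1 = q + 2 by ring]
      exact hqk.2
    · simp only [if_neg h10]
      rw [mul_comm]; exact hrk.2
  have hlt : ∀ q' r', 0 ≤ r' → r' < 10 → (0:Int) ≤ q' → (q' < tq ∨ (q' = tq ∧ r' < tr)) →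
      (q' + 2) ^ r'.toNat * (q' + 1) ^ ((10 - r').toNat) < k := by
    intro q' r' h1 h2 h3 h4
    by_cases hq' : q' < q
    · exact lt_trans (prod_lt_full q' r' h3 h1 (by omega)) (hqmin q' h3 hq')
    · -- q' = q (q' > q is impossible before the target)
      have hq'q : q' = q := by rw [htq_def] at h4; split at h4 <;> omega
      subst hq'q
      have hr' : r' < r := by rw [htq_def, htr_def] at h4; split at h4 <;> omega
      rw [mul_comm]; exact hrmin r' h1 hr'
  have hfuel : ((tq - 0) * 10 + (tr - 0)).toNat ≤ k.toNat := by
    by_cases hq1 : 1 ≤ q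
    · have h1024 := hqmin 0 le_rfl hq1
      norm_num at h1024
      have hq7 := hqk.1
      rw [htq_def, htr_def]; split <;> omega
    · have hq0' : q = 0 := by omega
      subst hq0'
      by_cases h10 : r = 10
      · have h512 := hrmin 9 (by norm_num) (by omega)
        rw [show ((10:Int) - 9).toNat = 1 from rfl, show ((9:Int)).toNat = 9 from rfl] at h512
        norm_num at h512
        rw [htq_def, htr_def]; simp only [if_pos h10]; omega
      · rw [htq_def, htr_def]; simp only [if_neg h10]
        rcases Int.lt_or_le 0 r with hrpos | hrneg
        · have hlt' := hrmin (r - 1) (by omega) (by omega)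
          norm_num at hlt'
          have hbound : r ≤ (2:Int) ^ (r.toNat - 1) := by
            have hr9 : r ≤ 9 := by
              have := hrk.1; omega
            interval_cases r <;> decide
          omega
        · omega
  have hwalk : walk k k.toNat 0 0 = (tq, tr) :=
    walk_first k k.toNat 0 0 tq tr le_rfl (by norm_num) htr0 htr10
      (by rw [htq_def]; split <;> omega) hfuel hge
      (fun q' r' h1 h2 h3 h4 => hlt q' r' h1 h2 h3 h4)
  have h0 : (List.range charsA.length).map (fun _ => (1 : Int)) = cnts 0 0 := by decide
  have h9 : ((charsA.length : Int) - 1) = 9 := by decide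
  simp only [solve, solve_alt, h0, h9, hq_def, hr_def]
  rw [loop_eq k k.toNat 0 0 9 le_rfl (by norm_num) (Or.inl (by norm_num)), hwalk]
  have := stringify_eq q r hr0 hrk.1
  rw [htq_def, htr_def]
  exact this
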